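-- pv_equiv track=rewrite | github.com/danielenapo/AI_unibo | Languages/test.py | fexp
-- ===== SOURCE A (Python) =====
-- def fexp(L):
--     if len(L)<2:
--         return True
--     res=True
--     sum=0
--     for i in range(len(L)):
--         if L[i]>sum:
--             sum+=L[i]
--             continue
--         res=False
--     return res
-- ===== SOURCE B (Python) =====
-- def fexp(L):
--     # Two-pass: materialize the prefix-sum table, then compare each element to it.
--     if len(L) < 2:
--         return True
--     prefix = [0]
--     for x in L[:-1]:
--         prefix.append(prefix[-1] + x)
--     return all(L[i] > prefix[i] for i in range(len(L)))
-- ===== Notes on version B (the rewrite author's own statement) =====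
-- stated objective: alternative
-- what changed: Replaces A's single scan with a mutable running sum and failure flag by two passes: first materialize the prefix-sum table, then check all(L[i] > prefix[i]); equal because up to the first failing index the accepted-sum equals the plain prefix sum, and both return False as soon as one index fails.
import Mathlib
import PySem

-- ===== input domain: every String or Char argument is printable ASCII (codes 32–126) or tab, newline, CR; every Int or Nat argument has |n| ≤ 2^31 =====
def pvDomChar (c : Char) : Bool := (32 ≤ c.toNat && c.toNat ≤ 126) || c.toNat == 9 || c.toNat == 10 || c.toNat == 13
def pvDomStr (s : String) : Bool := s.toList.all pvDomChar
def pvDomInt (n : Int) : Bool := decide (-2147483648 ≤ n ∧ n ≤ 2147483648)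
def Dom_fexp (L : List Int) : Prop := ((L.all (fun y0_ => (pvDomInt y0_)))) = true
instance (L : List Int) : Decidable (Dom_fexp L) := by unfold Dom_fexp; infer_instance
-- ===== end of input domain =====

-- B replaces A's one-pass running accumulator+flag by building the prefix-sum table and then
-- comparing each element to it (alternative decomposition, same cost).

-- ===== PORT A =====
-- A: single loop keeping (res, sum); adds L[i] to sum only when L[i] > sum, else res := false.
def fexp (L : List Int) : Bool :=
  if L.length < 2 then true
  else
    (L.foldl
      (fun (st : Bool × Int) x =>
        if x > st.2 then (st.1, st.2 + x) else (false, st.2))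
      (true, 0)).1

-- ===== PORT B =====
-- prefix-sum table: prefTable L s = [s, s+L[0], s+L[0]+L[1], …] (length = L.length)
def prefTable : List Int → Int → List Int
  | [], _ => []
  | x :: xs, s => s :: prefTable xs (s + x)

def fexp_alt (L : List Int) : Bool :=
  if L.length < 2 then true
  else (L.zip (prefTable L 0)).all (fun p => p.1 > p.2)

-- ===== PRECONDITION & SPEC =====
def Spec_fexp (L : List Int) (out : Bool) : Prop := out = fexp_alt L
instance (L : List Int) (out : Bool) : Decidable (Spec_fexp L out) := by unfold Spec_fexp; infer_instance

-- ===== CLAIM (what is proved, stated in full; the proofs are below) =====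
def Claim_equal_fexp : Prop := ∀ (L : List Int), Dom_fexp L → Spec_fexp L (fexp L)

-- ===== LEMMAS AND PROOFS =====

-- once the flag is false it stays false, and the sum no longer matters for the flag
theorem fexp_fold_false (L : List Int) (s : Int) :
    (L.foldl (fun (st : Bool × Int) x =>
        if x > st.2 then (st.1, st.2 + x) else (false, st.2)) (false, s)).1 = false := by
  induction L generalizing s with
  | nil => rfl
  | cons x xs ih =>
    simp only [List.foldl]
    by_cases h : x > s <;> simp [h, ih]

-- the key invariant: A's fold from (true, s) equals the zip-with-prefix check from s
theorem fexp_fold_eq (L : List Int) (s : Int) :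
    (L.foldl (fun (st : Bool × Int) x =>
        if x > st.2 then (st.1, st.2 + x) else (false, st.2)) (true, s)).1
      = (L.zip (prefTable L s)).all (fun p => p.1 > p.2) := by
  induction L generalizing s with
  | nil => rfl
  | cons x xs ih =>
    simp only [List.foldl, prefTable, List.zip_cons_cons, List.all_cons]
    by_cases h : x > s
    · simp [h, ih]
    · simp [h, fexp_fold_false]

-- ===== VERDICT (by name: the statement is the Claim_ definition above) =====
theorem fexp_spec : Claim_equal_fexp := by
  intro L _
  unfold Spec_fexp fexp fexp_alt
  by_cases h : L.length < 2
  · simp [h]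
  · simp [h, fexp_fold_eq]
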